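-- pv_equiv track=rewrite | github.com/leofari/nyt-spelling-bee-helper-project | spelling_bee_helper.py | sort_by_len
-- ===== SOURCE A (Python) =====
-- def alphabatizeList(unsortedList):
--     '''sig: list -> list
--     Takes a list and sorts its elements from lowest to highest.
--     Returns the sorted list.'''
--     unsorted = True
--     while unsorted:
--         unsorted = False
--         for x in range(1, len(unsortedList)):
--             if unsortedList[x - 1] > unsortedList[x]:
--                 unsortedList[x - 1], unsortedList[x] = unsortedList[x], unsortedList[x - 1]
--                 unsorted = True
--     return unsortedList
--
-- def sort_by_len(unsortedList):
--     '''sig: list -> dict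
--     Takes a list of words and creates a dictionary where each key is a word length
--     mapped to the list of words of that length.'''
--     myDict = {}
--     for element in unsortedList:
--         if len(element) not in myDict:
--             myDict[len(element)] = [element]
--         else:
--             myDict[len(element)] += [element]
--     # Sort each list of words alphabetically
--     for key in myDict:
--         alphabatizeList(myDict[key])
--     return myDict
-- ===== SOURCE B (Python) =====
-- def sort_by_len(unsortedList):
--     '''Group words by length; one global stable sort replaces per-bucket bubble sort.'''
--     s = sorted(unsortedList)
--     buckets = {}
--     for w in s:
--         buckets.setdefault(len(w), []).append(w)
--     # key order follows first appearance in the original list, like A's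
--     return {len(w): buckets[len(w)] for w in unsortedList}
-- ===== Notes on version B (the rewrite author's own statement) =====
-- stated objective: faster
-- what changed: B replaces A's per-bucket O(b^2) bubble sorts with one global Timsort of the whole list followed by a single stable grouping pass (stability makes each bucket come out alphabetical), keeping A's key insertion order.
import Mathlib
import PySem

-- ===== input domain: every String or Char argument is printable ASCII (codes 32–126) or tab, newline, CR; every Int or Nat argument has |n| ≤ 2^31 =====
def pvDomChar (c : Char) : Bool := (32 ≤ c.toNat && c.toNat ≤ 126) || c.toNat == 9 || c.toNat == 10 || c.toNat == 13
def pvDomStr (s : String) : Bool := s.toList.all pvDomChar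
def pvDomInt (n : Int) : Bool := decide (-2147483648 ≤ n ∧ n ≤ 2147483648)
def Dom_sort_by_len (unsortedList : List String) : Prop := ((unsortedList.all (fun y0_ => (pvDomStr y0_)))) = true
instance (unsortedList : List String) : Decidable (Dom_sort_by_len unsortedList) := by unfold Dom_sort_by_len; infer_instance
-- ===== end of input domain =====

-- B replaces A's per-bucket bubble sorts with one global sort + one stable grouping pass; same return value, same key order.

-- ===== PORT A =====
-- one pass of the 'for x in range(1, len)' adjacent-swap loop; returns (list after the pass, whether a swap happened)
def pvBubblePass : List String → List String × Bool
  | [] => ([], false)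
  | [a] => ([a], false)
  | a :: b :: t =>
    if b < a then
      let r := pvBubblePass (a :: t)
      (b :: r.1, true)
    else
      let r := pvBubblePass (b :: t)
      (a :: r.1, r.2)

-- inversion count: upper bound on the number of swapping passes the while loop performs (fuel; proved sufficient below)
def pvInv : List String → Nat
  | [] => 0
  | a :: t => t.countP (fun b => decide (b < a)) + pvInv t

-- the 'while unsorted:' loop; stops as soon as a pass makes no swap (the fuel never runs out: see pvBubbleLoop_sorted below)
def pvBubbleLoop : Nat → List String → List String
  | 0, l => l
  | fuel + 1, l =>
    let r := pvBubblePass l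
    if r.2 then pvBubbleLoop fuel r.1 else r.1

def alphabatizeList (unsortedList : List String) : List String :=
  pvBubbleLoop (pvInv unsortedList + 1) unsortedList

def sort_by_len (unsortedList : List String) : List (Int × List String) :=
  let myDict := unsortedList.foldl (fun d element =>
      if !(d.contains (PySem.Str.len element)) then
        d.insert (PySem.Str.len element) [element]
      else
        d.insert (PySem.Str.len element) (d.getD (PySem.Str.len element) [] ++ [element]))
    PySem.Dict.empty
  -- 'for key in myDict: alphabatizeList(myDict[key])' — sorts each value in place
  (myDict.keys.foldl (fun d key => d.insert key (alphabatizeList (d.getD key []))) myDict).items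

-- ===== PORT B =====
def sort_by_len_alt (unsortedList : List String) : List (Int × List String) :=
  let s := PySem.List.sorted unsortedList (fun x => x) false
  let buckets := s.foldl (fun d w => d.modify (PySem.Str.len w) [] (· ++ [w])) PySem.Dict.empty
  -- {len(w): buckets[len(w)] for w in unsortedList}; every len(w) is a key of buckets, so buckets[len(w)] = getD _ []
  (unsortedList.foldl (fun d w => d.insert (PySem.Str.len w) (buckets.getD (PySem.Str.len w) [])) PySem.Dict.empty).items

-- ===== PRECONDITION & SPEC =====
def Spec_sort_by_len (unsortedList : List String) (out : List (Int × List String)) : Prop := out = sort_by_len_alt unsortedList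
instance (unsortedList : List String) (out : List (Int × List String)) : Decidable (Spec_sort_by_len unsortedList out) := by unfold Spec_sort_by_len; infer_instance

-- ===== CLAIM (what is proved, stated in full; the proofs are below) =====
def Claim_equal_sort_by_len : Prop := ∀ (unsortedList : List String), Dom_sort_by_len unsortedList → Spec_sort_by_len unsortedList (sort_by_len unsortedList)

-- ===== LEMMAS AND PROOFS =====

theorem pvBubblePass_perm (l : List String) : (pvBubblePass l).1.Perm l := by
  induction l using pvBubblePass.induct with
  | case1 => simp [pvBubblePass]
  | case2 a => simp [pvBubblePass]
  | case3 a b t h ih =>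
      simp only [pvBubblePass, if_pos h]
      exact (ih.cons b).trans (List.Perm.swap a b t)
  | case4 a b t h ih =>
      simp only [pvBubblePass, if_neg h]
      exact ih.cons a

theorem pvBubblePass_false (l : List String) (h : (pvBubblePass l).2 = false) :
    (pvBubblePass l).1 = l ∧ l.Pairwise (· ≤ ·) := by
  induction l using pvBubblePass.induct with
  | case1 => simp [pvBubblePass]
  | case2 a => simp [pvBubblePass]
  | case3 a b t hlt ih =>
      simp only [pvBubblePass, if_pos hlt] at h
      exact absurd h (by simp)
  | case4 a b t hlt ih =>
      simp only [pvBubblePass, if_neg hlt] at h ⊢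
      obtain ⟨h1, h2⟩ := ih h
      refine ⟨by simp [h1], ?_⟩
      have hab : a ≤ b := le_of_not_gt hlt
      refine List.Pairwise.cons ?_ h2
      intro x hx
      rcases List.mem_cons.mp hx with hx | hx
      · exact hx ▸ hab
      · exact hab.trans (List.rel_of_pairwise_cons h2 hx)

theorem pvBubblePass_true (l : List String) (h : (pvBubblePass l).2 = true) :
    pvInv (pvBubblePass l).1 < pvInv l := by
  induction l using pvBubblePass.induct with
  | case1 => simp [pvBubblePass] at h
  | case2 a => simp [pvBubblePass] at h
  | case3 a b t hlt ih =>
      simp only [pvBubblePass, if_pos hlt]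
      have hcnt : (pvBubblePass (a :: t)).1.countP (fun c => decide (c < b)) =
          (a :: t).countP (fun c => decide (c < b)) := (pvBubblePass_perm (a :: t)).countP_eq _
      have hna : ¬ (a < b) := fun hab => absurd (hab.trans hlt) (lt_irrefl a)
      have hle : pvInv (pvBubblePass (a :: t)).1 ≤ pvInv (a :: t) := by
        cases hf : (pvBubblePass (a :: t)).2 with
        | true => exact le_of_lt (ih hf)
        | false => rw [(pvBubblePass_false _ hf).1]
      simp only [pvInv, List.countP_cons, hcnt] at *
      simp only [decide_eq_true_eq, if_neg hna, if_pos hlt] at *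
      omega
  | case4 a b t hlt ih =>
      simp only [pvBubblePass, if_neg hlt] at h ⊢
      have ih' := ih h
      have hcnt : (pvBubblePass (b :: t)).1.countP (fun c => decide (c < a)) =
          (b :: t).countP (fun c => decide (c < a)) := (pvBubblePass_perm (b :: t)).countP_eq _
      simp only [pvInv, hcnt] at *
      omega

theorem pvBubbleLoop_perm (fuel : Nat) (l : List String) : (pvBubbleLoop fuel l).Perm l := by
  induction fuel generalizing l with
  | zero => simp [pvBubbleLoop]
  | succ f ih =>
      simp only [pvBubbleLoop]
      cases hf : (pvBubblePass l).2 with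
      | true => simpa [hf] using (ih (pvBubblePass l).1).trans (pvBubblePass_perm l)
      | false => simpa [hf] using pvBubblePass_perm l

theorem pvBubbleLoop_sorted (fuel : Nat) (l : List String) (h : pvInv l < fuel) :
    (pvBubbleLoop fuel l).Pairwise (· ≤ ·) := by
  induction fuel generalizing l with
  | zero => omega
  | succ f ih =>
      simp only [pvBubbleLoop]
      cases hf : (pvBubblePass l).2 with
      | true =>
          have := pvBubblePass_true l hf
          simpa [hf] using ih (pvBubblePass l).1 (by omega)
      | false =>
          have h1 := pvBubblePass_false l hf
          simpa [hf, h1.1] using h1.2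

theorem alphabatizeList_eq_sorted (l : List String) :
    alphabatizeList l = PySem.List.sorted l (fun x => x) false :=
  (PySem.List.sorted_id_eq_of_perm_of_pairwise l _ (pvBubbleLoop_perm _ l)
    (pvBubbleLoop_sorted _ l (Nat.lt_succ_self _))).symm

-- A's per-bucket bubble sort of a filtered sublist = the same filter applied to B's one global sort
theorem pv_alpha_filter (p : String → Bool) (l : List String) :
    alphabatizeList (l.filter p) = (PySem.List.sorted l (fun x => x) false).filter p := by
  rw [alphabatizeList_eq_sorted]
  exact PySem.List.sorted_id_eq_of_perm_of_pairwise _ _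
    ((PySem.List.sorted_perm l (fun x => x) false).filter p)
    ((PySem.List.sorted_pairwise l (fun x => x)).filter p)

-- the modify-append grouping loop, read back at a key
theorem pv_group_getD (l : List String) (c : Int) :
    (l.foldl (fun d w => d.modify (PySem.Str.len w) [] (· ++ [w])) PySem.Dict.empty).getD c []
      = l.filter (fun e => PySem.Str.len e == c) := by
  have h1 : l.foldl (fun d w => d.modify (PySem.Str.len w) [] (· ++ [w])) PySem.Dict.empty
      = (l.map (fun e => (PySem.Str.len e, e))).foldl (fun d p => d.modify p.1 [] (· ++ [p.2])) PySem.Dict.empty := by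
    rw [List.foldl_map]
  rw [h1, PySem.Dict.getD_foldl_modify_append]
  simp [List.filter_map, Function.comp_def, List.map_map]

theorem pvSet_update_of_subset (xs : List Int) (s : PySem.Set Int) (h : ∀ x ∈ xs, x ∈ s) :
    PySem.Set.update s xs = s := by
  induction xs generalizing s with
  | nil => rfl
  | cons x t ih =>
      have hx : PySem.Set.add s x = s := by
        simp [PySem.Set.add, PySem.Set.contains, h x (by simp)]
      simp only [PySem.Set.update, List.foldl_cons] at *
      rw [hx]
      exact ih s (fun y hy => h y (by simp [hy]))

-- A's second loop ('sort each value in place'), read back at a key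
theorem pv_getD_fold_sort (ks : List Int) (d : PySem.Dict Int (List String)) (hnd : ks.Nodup) (k : Int) :
    (ks.foldl (fun d key => d.insert key (alphabatizeList (d.getD key []))) d).getD k []
      = if k ∈ ks then alphabatizeList (d.getD k []) else d.getD k [] := by
  induction ks generalizing d with
  | nil => simp
  | cons k0 t ih =>
      simp only [List.foldl_cons]
      rw [ih _ (List.nodup_cons.mp hnd).2]
      by_cases hk : k ∈ t
      · have hne : k ≠ k0 := fun he => (List.nodup_cons.mp hnd).1 (he ▸ hk)
        rw [if_pos hk, if_pos (List.mem_cons_of_mem _ hk), PySem.Dict.getD_insert, if_neg hne]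
      · rw [if_neg hk, PySem.Dict.getD_insert]
        by_cases he : k = k0
        · rw [if_pos he, if_pos (List.mem_cons.mpr (Or.inl he)), he]
        · rw [if_neg he, if_neg (by
            simp only [List.mem_cons]
            rintro (h | h)
            · exact he h
            · exact hk h)]

-- B's rebuild loop, where the inserted value depends only on the key
theorem pv_getD_fold_insertB (F : Int → List String) (l : List String) (d : PySem.Dict Int (List String)) (k : Int) :
    (l.foldl (fun d w => d.insert (PySem.Str.len w) (F (PySem.Str.len w))) d).getD k []
      = if k ∈ l.map PySem.Str.len then F k else d.getD k [] := by
  induction l generalizing d with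
  | nil => simp
  | cons w t ih =>
      simp only [List.foldl_cons, List.map_cons]
      rw [ih]
      by_cases hk : k ∈ t.map PySem.Str.len
      · simp [hk, List.mem_cons]
      · rw [if_neg hk, PySem.Dict.getD_insert]
        by_cases he : k = PySem.Str.len w
        · rw [if_pos he, if_pos (List.mem_cons.mpr (Or.inl he)), he]
        · rw [if_neg he, if_neg (by
            simp only [List.mem_cons]
            rintro (h | h)
            · exact he h
            · exact hk h)]

-- ===== VERDICT (by name: the statement is the Claim_ definition above) =====
theorem sort_by_len_spec : Claim_equal_sort_by_len := by
  unfold Claim_equal_sort_by_len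
  intro l _
  unfold Spec_sort_by_len sort_by_len sort_by_len_alt
  -- A's grouping step IS d.modify (len e) [] (· ++ [e])
  have hstepA : (fun (d : PySem.Dict Int (List String)) element =>
      if !(d.contains (PySem.Str.len element)) then
        d.insert (PySem.Str.len element) [element]
      else
        d.insert (PySem.Str.len element) (d.getD (PySem.Str.len element) [] ++ [element]))
      = fun d w => d.modify (PySem.Str.len w) [] (· ++ [w]) := by
    funext d e
    cases hc : d.contains (PySem.Str.len e) with
    | true => simp [PySem.Dict.modify]
    | false =>
        have hg : d.getD (PySem.Str.len e) [] = [] := PySem.Dict.getD_of_not_contains d [] hc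
        unfold PySem.Dict.modify
        rw [hg]
        simp
  rw [hstepA]
  set G := l.foldl (fun d w => d.modify (PySem.Str.len w) [] (· ++ [w])) PySem.Dict.empty with hG
  have hGkeys : G.keys = PySem.Set.ofList (l.map PySem.Str.len) := by
    rw [hG, PySem.Dict.keys_foldl_modify_key l PySem.Str.len [] (fun _ w => (· ++ [w]))]
    simp [PySem.Dict.keys_empty]
    rfl
  have hGnodup : G.keys.Nodup := by
    rw [hG]
    exact PySem.Dict.nodup_keys_foldl_modify_key l PySem.Str.len [] (fun _ w => (· ++ [w])) _ (by simp [PySem.Dict.keys_empty])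
  set S := G.keys.foldl (fun d key => d.insert key (alphabatizeList (d.getD key []))) G with hS
  have hSkeys : S.keys = G.keys := by
    rw [hS, PySem.Dict.keys_foldl_insert]
    exact pvSet_update_of_subset _ _ (fun x hx => hx)
  have hSnodup : S.keys.Nodup := hSkeys ▸ hGnodup
  -- B's side
  set sl := PySem.List.sorted l (fun x => x) false with hsl
  set B := l.foldl (fun d w => d.insert (PySem.Str.len w)
      ((sl.foldl (fun d w => d.modify (PySem.Str.len w) [] (· ++ [w])) PySem.Dict.empty).getD (PySem.Str.len w) [])) PySem.Dict.empty with hB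
  have hBkeys : B.keys = PySem.Set.ofList (l.map PySem.Str.len) := by
    rw [hB, PySem.Dict.keys_foldl_insert_key l PySem.Str.len]
    simp [PySem.Dict.keys_empty]
    rfl
  have hBnodup : B.keys.Nodup := by
    rw [hB]
    exact PySem.Dict.nodup_keys_foldl_insert_key l PySem.Str.len _ _ (by simp [PySem.Dict.keys_empty])
  rw [PySem.Dict.items_eq_map_keys S hSnodup [], PySem.Dict.items_eq_map_keys B hBnodup []]
  rw [hSkeys, hBkeys, hGkeys]
  apply List.map_congr_left
  intro k hk
  have hkmem : k ∈ l.map PySem.Str.len := (PySem.Set.mem_ofList _ _).mp hk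
  have hSget : S.getD k [] = alphabatizeList (G.getD k []) := by
    rw [hS, pv_getD_fold_sort G.keys G hGnodup k, if_pos (hGkeys ▸ hk)]
  have hBget : B.getD k [] = sl.filter (fun e => PySem.Str.len e == k) := by
    rw [hB, pv_getD_fold_insertB (fun c =>
      (sl.foldl (fun d w => d.modify (PySem.Str.len w) [] (· ++ [w])) PySem.Dict.empty).getD c []),
      if_pos hkmem, pv_group_getD]
  have hGget : G.getD k [] = l.filter (fun e => PySem.Str.len e == k) := pv_group_getD l k
  rw [hSget, hBget, hGget, pv_alpha_filter]
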